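-- pv_equiv track=rewrite | github.com/rongchengit/SongPopularityPredictorML | src/gathering/search.py | generate_two_letter_combos
-- ===== SOURCE A (Python) =====
-- import string
--
-- def generate_two_letter_combos(start_combo=None):
--     alphabet = string.ascii_lowercase
--     two_letter_combos = []
--
--     for first_letter in alphabet:
--         for second_letter in alphabet:
--             combo = f"{first_letter}{second_letter}"
--             if start_combo is None or combo >= start_combo:
--                 two_letter_combos.append(combo)
--
--     return two_letter_combos
-- ===== SOURCE B (Python) =====
-- import string
--
-- def generate_two_letter_combos(start_combo=None):
--     alphabet = string.ascii_lowercase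
--     combos = [a + b for a in alphabet for b in alphabet]
--     if start_combo is None:
--         return combos
--     # hand-written bisect_left (same algorithm as the stdlib's) -- binary
--     # search for the first combo >= start_combo, then slice.
--     lo, hi = 0, len(combos)
--     while lo < hi:
--         mid = (lo + hi) // 2
--         if combos[mid] < start_combo:
--             lo = mid + 1
--         else:
--             hi = mid
--     return combos[lo:]
-- ===== Notes on version B (the rewrite author's own statement) =====
-- stated objective: alternative
-- what changed: Replaces the nested per-combo linear comparison filter with building the sorted 676-combo table once and binary-searching (hand-written bisect_left, no extra imports) for the first combo >= start_combo, returning a slice.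
import Mathlib
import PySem

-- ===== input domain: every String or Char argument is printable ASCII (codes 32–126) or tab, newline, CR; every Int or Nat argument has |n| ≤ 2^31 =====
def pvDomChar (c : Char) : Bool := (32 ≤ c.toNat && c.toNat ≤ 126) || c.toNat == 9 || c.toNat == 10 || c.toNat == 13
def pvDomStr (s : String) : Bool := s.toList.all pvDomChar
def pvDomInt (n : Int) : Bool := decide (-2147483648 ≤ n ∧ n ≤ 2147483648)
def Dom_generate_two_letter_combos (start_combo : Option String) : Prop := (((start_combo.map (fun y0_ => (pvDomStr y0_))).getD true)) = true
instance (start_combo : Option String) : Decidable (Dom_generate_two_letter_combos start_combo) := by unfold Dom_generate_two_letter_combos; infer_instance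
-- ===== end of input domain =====

-- B replaces A's per-combo linear comparison filter by building the sorted combo
-- table once and binary-searching (bisect_left) for the first combo ≥ start_combo,
-- returning a tail slice; an alternative of similar cost, proved equal everywhere.

-- ===== PORT A =====
-- string.ascii_lowercase (shared by both Pythons)
def pvAsciiLowercase : List Char := "abcdefghijklmnopqrstuvwxyz".toList

-- literal port of A: nested for-loops appending each combo that passes the test;
-- Python's `combo >= start_combo` on str is `¬ combo < start_combo` (total order),
-- stored with PySem.Chars.strLt (exact code-point comparison).
def generate_two_letter_combos (start_combo : Option String) : List String :=
  pvAsciiLowercase.foldl (fun acc first_letter =>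
    pvAsciiLowercase.foldl (fun acc2 second_letter =>
      let combo := String.ofList [first_letter, second_letter]
      if (match start_combo with
          | none => true
          | some st => !PySem.Chars.strLt combo.toList st.toList) then
        acc2 ++ [combo]
      else acc2) acc) []

-- ===== PORT B =====
-- literal port of B: build the table, binary-search (the hand-written while loop in
-- Source B is CPython's bisect_left, ported as PySem.List.bisectLeft), slice from lo.
def generate_two_letter_combos_alt (start_combo : Option String) : List String :=
  let combos := pvAsciiLowercase.flatMap (fun a => pvAsciiLowercase.map (fun b => String.ofList [a, b]))
  match start_combo with
  | none => combos
  | some st =>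
      let lo := PySem.List.bisectLeft combos st
      PySem.List.slice combos (some (lo : Int)) none

-- ===== PRECONDITION & SPEC =====
def Spec_generate_two_letter_combos (start_combo : Option String) (out : List String) : Prop := out = generate_two_letter_combos_alt start_combo
instance (start_combo : Option String) (out : List String) : Decidable (Spec_generate_two_letter_combos start_combo out) := by unfold Spec_generate_two_letter_combos; infer_instance

-- ===== CLAIM (what is proved, stated in full; the proofs are below) =====
def Claim_equal_generate_two_letter_combos : Prop := ∀ (start_combo : Option String), Dom_generate_two_letter_combos start_combo → Spec_generate_two_letter_combos start_combo (generate_two_letter_combos start_combo)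

-- ===== LEMMAS AND PROOFS =====

-- the combo table, as both ports build it
def pvCombos : List String :=
  pvAsciiLowercase.flatMap (fun a => pvAsciiLowercase.map (fun b => String.ofList [a, b]))

lemma pvAlphabet_pairwise_lt : pvAsciiLowercase.Pairwise (· < ·) := by decide

lemma pvCombos_pairwise_le : pvCombos.Pairwise (· ≤ ·) := by
  unfold pvCombos
  rw [List.pairwise_flatMap]
  refine ⟨fun a _ => ?_, ?_⟩
  · rw [List.pairwise_map]
    exact pvAlphabet_pairwise_lt.imp (fun h =>
      le_of_lt (String.lt_iff_toList_lt.mpr (by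
        simp only [String.toList_ofList]
        exact List.Lex.cons (List.Lex.rel h))))
  · exact pvAlphabet_pairwise_lt.imp (fun h x hx y hy => by
      simp only [List.mem_map] at hx hy
      obtain ⟨b, _, rfl⟩ := hx
      obtain ⟨b', _, rfl⟩ := hy
      exact le_of_lt (String.lt_iff_toList_lt.mpr (by
        simp only [String.toList_ofList]
        exact List.Lex.rel h)))

-- bisectLeft's loop invariant, for String keys (PySem states it for Int only)
lemma pvBisectLoop_spec (xs : List String) (x : String) (hs : xs.Pairwise (· ≤ ·)) :
    ∀ (fuel lo hi : Nat), lo ≤ hi → hi ≤ xs.length → hi - lo ≤ fuel →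
    (∀ j (hj : j < xs.length), j < lo → xs[j] < x) →
    (∀ j (hj : j < xs.length), hi ≤ j → x ≤ xs[j]) →
    (PySem.List.bisectLeftLoop xs x fuel lo hi ≤ xs.length ∧
     (∀ j (hj : j < xs.length), j < PySem.List.bisectLeftLoop xs x fuel lo hi → xs[j] < x) ∧
     (∀ j (hj : j < xs.length), PySem.List.bisectLeftLoop xs x fuel lo hi ≤ j → x ≤ xs[j])) := by
  have hmono := List.pairwise_iff_getElem.mp hs
  intro fuel
  induction fuel with
  | zero =>
    intro lo hi hlh hhl hfuel hlo hhi
    rw [PySem.List.bisectLeftLoop.eq_1]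
    exact ⟨by omega, hlo, fun j hj hge => hhi j hj (by omega)⟩
  | succ fuel ih =>
    intro lo hi hlh hhl hfuel hlo hhi
    rw [PySem.List.bisectLeftLoop.eq_2]
    by_cases hlt : lo < hi
    · rw [if_pos hlt]
      have hmid : (lo + hi) / 2 < xs.length := by omega
      rw [List.getElem?_eq_getElem hmid]
      dsimp only
      by_cases hy : xs[(lo + hi) / 2] < x
      · rw [if_pos hy]
        apply ih ((lo + hi) / 2 + 1) hi (by omega) hhl (by omega) ?_ hhi
        intro j hj hjlt
        rcases Nat.lt_or_ge j ((lo + hi) / 2) with h | h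
        · exact lt_of_le_of_lt (hmono j _ hj hmid h) hy
        · have : j = (lo + hi) / 2 := by omega
          subst this; exact hy
      · rw [if_neg hy]
        apply ih lo ((lo + hi) / 2) (by omega) (by omega) (by omega) hlo ?_
        intro j hj hge
        rcases Nat.lt_or_ge ((lo + hi) / 2) j with h | h
        · exact le_trans (not_lt.mp hy) (hmono _ j hmid hj h)
        · have : j = (lo + hi) / 2 := by omega
          subst this; exact not_lt.mp hy
    · rw [if_neg hlt]
      exact ⟨by omega, hlo, fun j hj hge => hhi j hj (by omega)⟩

-- a filter whose predicate is false exactly below index k is a drop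
lemma pvFilter_eq_drop {α : Type} (p : α → Bool) :
    ∀ (xs : List α) (k : Nat), k ≤ xs.length →
    (∀ j (hj : j < xs.length), j < k → p xs[j] = false) →
    (∀ j (hj : j < xs.length), k ≤ j → p xs[j] = true) →
    xs.filter p = xs.drop k := by
  intro xs
  induction xs with
  | nil => intro k hk _ _; simp at hk; simp [hk]
  | cons a t ih =>
    intro k hk hfalse htrue
    cases k with
    | zero =>
      have ha : p a = true := htrue 0 (by simp) (by omega)
      simp only [List.filter_cons, ha, if_pos, List.drop_zero]
      rw [ih 0 (by omega) (fun j hj hjk => by omega)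
            (fun j hj _ => htrue (j + 1) (by simpa using Nat.succ_lt_succ hj) (by omega))]
      simp
    | succ k =>
      have ha : p a = false := hfalse 0 (by simp) (by omega)
      simp only [List.filter_cons, ha, Bool.false_eq_true, if_neg, List.drop_succ_cons,
        not_false_iff]
      exact ih k (by simpa using hk)
        (fun j hj hjk => hfalse (j + 1) (by simpa using Nat.succ_lt_succ hj) (by omega))
        (fun j hj hjk => htrue (j + 1) (by simpa using Nat.succ_lt_succ hj) (by omega))

lemma pvA_none : generate_two_letter_combos none = pvCombos := by
  unfold generate_two_letter_combos pvCombos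
  simp only [if_true, PySem.List.foldl_append_singleton_eq_map,
    PySem.List.foldl_append_eq_flatMap, List.nil_append]

lemma pvA_some (st : String) :
    generate_two_letter_combos (some st) =
      pvCombos.filter (fun c => !PySem.Chars.strLt c.toList st.toList) := by
  unfold generate_two_letter_combos pvCombos
  simp only [PySem.List.foldl_append_if, PySem.List.foldl_append_eq_flatMap, List.nil_append,
    List.filter_flatMap, List.filter_map]
  rfl

lemma pvB_none : generate_two_letter_combos_alt none = pvCombos := by
  unfold generate_two_letter_combos_alt pvCombos
  rfl

lemma pvB_some (st : String) :
    generate_two_letter_combos_alt (some st) =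
      pvCombos.drop (PySem.List.bisectLeft pvCombos st) := by
  unfold generate_two_letter_combos_alt pvCombos
  exact PySem.List.slice_from_natCast _ _

-- ===== VERDICT (by name: the statement is the Claim_ definition above) =====
theorem generate_two_letter_combos_spec : Claim_equal_generate_two_letter_combos := by
  intro start_combo _
  unfold Spec_generate_two_letter_combos
  cases start_combo with
  | none => rw [pvA_none, pvB_none]
  | some st =>
    rw [pvA_some st, pvB_some st]
    have hspec := pvBisectLoop_spec pvCombos st pvCombos_pairwise_le
      pvCombos.length 0 pvCombos.length (by omega) (le_refl _) (by omega)
      (fun j hj h => by omega) (fun j hj h => by omega)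
    have hk : PySem.List.bisectLeft pvCombos st =
        PySem.List.bisectLeftLoop pvCombos st pvCombos.length 0 pvCombos.length := rfl
    rw [hk]
    apply pvFilter_eq_drop _ _ _ hspec.1
    · intro j hj hjk
      have := hspec.2.1 j hj hjk
      simp [PySem.Chars.strLt, String.lt_iff_toList_lt.mp this]
    · intro j hj hjk
      have := hspec.2.2 j hj hjk
      simp [PySem.Chars.strLt]
      exact String.le_iff_toList_le.mp this
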